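-- pv_equiv track=rewrite | github.com/codersidprogrammer/nays | nays/ui/handler/tree_view_handler.py | _cleanSeparators
-- ===== SOURCE A (Python) =====
-- from typing import Any, Callable, Dict, List, Optional, Tuple
--
-- def _cleanSeparators(entries: List[Dict]) -> List[Dict]:
--     """Remove leading, trailing, and consecutive separators."""
--     result = []
--     for e in entries:
--         if e.get("separator"):
--             if result and not result[-1].get("separator"):
--                 result.append(e)
--         else:
--             result.append(e)
--     while result and result[-1].get("separator"):
--         result.pop()
--     return result
-- ===== SOURCE B (Python) =====
-- from typing import Dict, List
--
-- def _cleanSeparators(entries: List[Dict]) -> List[Dict]: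
--     """Remove leading, trailing, and consecutive separators.
--
--     Backward pass computes, for each position, whether a non-separator
--     follows; a comprehension then keeps each entry whose retention is
--     decided purely from its neighbours (no streaming result / trailing pop).
--     """
--     later = False
--     has_later = []
--     for e in reversed(entries):
--         has_later.append(later)
--         if not e.get("separator"):
--             later = True
--     has_later.reverse()
--     prevs = [None] + entries[:-1]
--     return [e for e, p, hl in zip(entries, prevs, has_later)
--             if not e.get("separator")
--             or (p is not None and not p.get("separator") and hl)]
-- ===== Notes on version B (the rewrite author's own statement) =====
-- stated objective: alternative
-- what changed: Replaced the streaming pass (append while checking result[-1], then a trailing while-pop) by a backward pass computing a has-later-non-separator flag plus a single comprehension keeping each entry from its neighbours alone.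
import Mathlib
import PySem

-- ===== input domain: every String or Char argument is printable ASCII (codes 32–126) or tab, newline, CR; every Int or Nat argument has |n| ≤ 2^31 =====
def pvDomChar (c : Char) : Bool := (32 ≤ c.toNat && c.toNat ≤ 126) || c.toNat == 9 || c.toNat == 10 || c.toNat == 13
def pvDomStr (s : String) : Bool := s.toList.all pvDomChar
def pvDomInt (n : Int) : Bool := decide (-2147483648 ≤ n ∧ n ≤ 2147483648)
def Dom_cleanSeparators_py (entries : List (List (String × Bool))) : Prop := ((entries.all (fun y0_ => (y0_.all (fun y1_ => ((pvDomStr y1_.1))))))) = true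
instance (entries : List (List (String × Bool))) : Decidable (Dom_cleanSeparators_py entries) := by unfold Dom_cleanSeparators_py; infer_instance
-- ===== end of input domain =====

-- B replaces A's streaming append/trailing-pop by a backward has-later pass plus a neighbour-based filter; same values, alternative structure.

-- e.get("separator") is truthy (value is a Bool; missing key → None → falsy)
def pvIsSep (e : List (String × Bool)) : Bool :=
  ((PySem.Dict.mk e).get? "separator").getD false

-- ===== PORT A =====
-- body of A's for-loop over entries (result-accumulator step)
def pvStepA (res : List (List (String × Bool))) (e : List (String × Bool)) : List (List (String × Bool)) :=
  if pvIsSep e then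
    (match res.getLast? with
     | some last => if ¬ pvIsSep last then res ++ [e] else res
     | none => res)
  else res ++ [e]

-- the 'while result and result[-1].get("separator"): result.pop()' loop, run on the reversed list
def pvPopAux : List (List (String × Bool)) → List (List (String × Bool))
  | [] => []
  | e :: t => if pvIsSep e then pvPopAux t else e :: t

def cleanSeparators_py (entries : List (List (String × Bool))) : List (List (String × Bool)) :=
  let result := entries.foldl pvStepA []
  (pvPopAux result.reverse).reverse

-- ===== PORT B =====
-- backward loop over reversed(entries): fst = 'later' flag, snd = has_later list (in original order)
def pvHL : List (List (String × Bool)) → Bool × List Bool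
  | [] => (false, [])
  | e :: t =>
    let p := pvHL t
    (p.1 || !pvIsSep e, p.1 :: p.2)

-- the comprehension's retention condition, on one ((entry, prev), has_later) triple
def pvKeepB (x : (List (String × Bool) × Option (List (String × Bool))) × Bool) : Bool :=
  !pvIsSep x.1.1 ||
  (match x.1.2 with
   | some p => !pvIsSep p && x.2
   | none => false)

def cleanSeparators_py_alt (entries : List (List (String × Bool))) : List (List (String × Bool)) :=
  let hasLater := (pvHL entries).2
  let prevs : List (Option (List (String × Bool))) := none :: (entries.dropLast.map some)
  (((entries.zip prevs).zip hasLater).filter pvKeepB).map (fun x => x.1.1)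

-- ===== PRECONDITION & SPEC =====
def Spec_cleanSeparators_py (entries : List (List (String × Bool))) (out : List (List (String × Bool))) : Prop := out = cleanSeparators_py_alt entries
instance (entries : List (List (String × Bool))) (out : List (List (String × Bool))) : Decidable (Spec_cleanSeparators_py entries out) := by unfold Spec_cleanSeparators_py; infer_instance

-- ===== CLAIM (what is proved, stated in full; the proofs are below) =====
def Claim_equal_cleanSeparators_py : Prop := ∀ (entries : List (List (String × Bool))), Dom_cleanSeparators_py entries → Spec_cleanSeparators_py entries (cleanSeparators_py entries)

-- ===== LEMMAS AND PROOFS =====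

-- what A's fold appends after 'res', as a function of whether the last kept element is a separator
-- (b = true also covers the empty accumulator: a separator is dropped either way)
def pvG : Bool → List (List (String × Bool)) → List (List (String × Bool))
  | _, [] => []
  | b, e :: t => if pvIsSep e then (if b then pvG true t else e :: pvG true t) else e :: pvG false t

-- recursive form of B: flag = previous element exists and is not a separator
def pvBgo : Bool → List (List (String × Bool)) → List (List (String × Bool))
  | _, [] => []
  | pb, e :: t =>
    if pvIsSep e then
      (if pb && t.any (fun x => !pvIsSep x) then e :: pvBgo false t else pvBgo false t)
    else e :: pvBgo true t

def pvPopTrail (l : List (List (String × Bool))) : List (List (String × Bool)) :=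
  (pvPopAux l.reverse).reverse

theorem pvPopAux_eq_dropWhile (l : List (List (String × Bool))) :
    pvPopAux l = l.dropWhile pvIsSep := by
  induction l with
  | nil => rfl
  | cons e t ih => simp [pvPopAux, List.dropWhile, ih]; split <;> simp_all

theorem pvPopTrail_cons (e : List (String × Bool)) (m : List (List (String × Bool))) :
    pvPopTrail (e :: m) =
      if pvIsSep e && (pvPopTrail m).isEmpty then [] else e :: pvPopTrail m := by
  simp only [pvPopTrail, pvPopAux_eq_dropWhile, List.reverse_cons, List.dropWhile_append]
  by_cases hm : m.reverse.dropWhile pvIsSep = []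
  · simp [hm, List.dropWhile]
    by_cases hs : pvIsSep e <;> simp [hs]
  · simp only [List.reverse_append, List.dropWhile]
    have : ((m.reverse.dropWhile pvIsSep).isEmpty) = false := by
      simpa [List.isEmpty_iff] using hm
    simp [this, List.isEmpty_iff, hm]

def pvPB (res : List (List (String × Bool))) : Bool :=
  match res.getLast? with
  | some x => pvIsSep x
  | none => true

theorem pvStepA_eq (res : List (List (String × Bool))) (e : List (String × Bool)) :
    pvStepA res e = if pvIsSep e && pvPB res then res else res ++ [e] := by
  unfold pvStepA pvPB
  cases res.getLast? with
  | none => by_cases hs : pvIsSep e <;> simp [hs]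
  | some last => by_cases hs : pvIsSep e <;> by_cases hl : pvIsSep last <;> simp [hs, hl]

theorem pvFold_g (l : List (List (String × Bool))) (res : List (List (String × Bool))) :
    l.foldl pvStepA res = res ++ pvG (pvPB res) l := by
  induction l generalizing res with
  | nil => simp [pvG]
  | cons e t ih =>
    simp only [List.foldl_cons, pvStepA_eq]
    by_cases hs : pvIsSep e
    · by_cases hb : pvPB res
      · simp only [hs, hb, Bool.and_self, ite_true]
        rw [ih res]
        simp [pvG, hs, hb]
      · simp only [hs, Bool.true_and, hb, ite_false, Bool.false_eq_true, if_neg, not_false_eq_true]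
        rw [ih (res ++ [e])]
        have : pvPB (res ++ [e]) = true := by simp [pvPB, List.getLast?_concat, hs]
        rw [this]
        simp only [pvG, hs, ite_true, if_pos]
        have hb' : pvPB res = false := by simpa using hb
        simp [hb']
      all_goals skip
    · simp only [hs, Bool.false_and, ite_false, Bool.false_eq_true, if_neg, not_false_eq_true]
      rw [ih (res ++ [e])]
      have : pvPB (res ++ [e]) = false := by simp [pvPB, List.getLast?_concat, hs]
      rw [this]
      cases hb : pvPB res <;> simp [pvG, hs]

theorem pvBgo_false_nil (t : List (List (String × Bool))) :
    (pvBgo false t = []) ↔ (t.any (fun x => !pvIsSep x) = false) := by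
  induction t with
  | nil => simp [pvBgo]
  | cons e t ih =>
    by_cases hs : pvIsSep e <;> simp [pvBgo, hs, ih]

theorem pvPop_g (t : List (List (String × Bool))) :
    pvPopTrail (pvG true t) = pvBgo false t ∧ pvPopTrail (pvG false t) = pvBgo true t := by
  induction t with
  | nil => exact ⟨rfl, rfl⟩
  | cons e t ih =>
    obtain ⟨ih1, ih2⟩ := ih
    by_cases hs : pvIsSep e
    · refine ⟨?_, ?_⟩
      · have h1 : pvG true (e :: t) = pvG true t := by simp [pvG, hs]
        have h2 : pvBgo false (e :: t) = pvBgo false t := by simp [pvBgo, hs]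
        rw [h1, h2, ih1]
      · have h1 : pvG false (e :: t) = e :: pvG true t := by simp [pvG, hs]
        rw [h1, pvPopTrail_cons, ih1]
        by_cases hany : t.any (fun x => !pvIsSep x) = true
        · have hne : pvBgo false t ≠ [] := by
            intro h; rw [(pvBgo_false_nil t).mp h] at hany; exact Bool.false_ne_true hany
          rw [if_neg (by simp [List.isEmpty_iff, hne])]
          simp [pvBgo, hs, hany]
        · have he : pvBgo false t = [] := (pvBgo_false_nil t).mpr (by simpa using hany)
          rw [he, if_pos (by simp [hs])]
          simp [pvBgo, hs, hany, he]
    · refine ⟨?_, ?_⟩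
      · have h1 : pvG true (e :: t) = e :: pvG false t := by simp [pvG, hs]
        rw [h1, pvPopTrail_cons, ih2]
        simp [pvBgo, hs]
      · have h1 : pvG false (e :: t) = e :: pvG false t := by simp [pvG, hs]
        rw [h1, pvPopTrail_cons, ih2]
        simp [pvBgo, hs]

theorem pvHL_fst (t : List (List (String × Bool))) :
    (pvHL t).1 = t.any (fun x => !pvIsSep x) := by
  induction t with
  | nil => rfl
  | cons e t ih => simp [pvHL, ih, Bool.or_comm]

-- the [None] + entries[:-1] prefix list may be extended past the zip's reach
theorem pvZip_prevs (l : List (List (String × Bool))) (x : Option (List (String × Bool))) :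
    l.zip (x :: l.dropLast.map some) = l.zip (x :: l.map some) := by
  induction l generalizing x with
  | nil => rfl
  | cons e t ih =>
    cases t with
    | nil => rfl
    | cons a t' =>
      have h := ih (some e)
      simp only [List.zip_cons_cons, List.map_cons,
        List.dropLast_cons_of_ne_nil (by simp : a :: t' ≠ [])] at h ⊢
      injection h with _ h2
      rw [h2]

theorem pvKeepB_eq (e : List (String × Bool)) (p : Option (List (String × Bool))) (h : Bool) :
    pvKeepB ((e, p), h) =
      (!pvIsSep e || ((match p with | some q => !pvIsSep q | none => false) && h)) := by
  cases p <;> simp [pvKeepB]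

theorem pvAlt_go (l : List (List (String × Bool))) (p : Option (List (String × Bool))) :
    (((l.zip (p :: l.map some)).zip (pvHL l).2).filter pvKeepB).map (fun x => x.1.1)
    = pvBgo (match p with | some q => !pvIsSep q | none => false) l := by
  induction l generalizing p with
  | nil => simp [pvBgo]
  | cons e t ih =>
    rw [show (pvHL (e :: t)).2 = (pvHL t).1 :: (pvHL t).2 from rfl]
    simp only [List.map_cons, List.zip_cons_cons, List.filter_cons]
    rw [pvKeepB_eq, pvHL_fst]
    by_cases hs : pvIsSep e
    · by_cases hpb : ((match p with | some q => !pvIsSep q | none => false)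
          && t.any (fun x => !pvIsSep x)) = true
      · rw [if_pos (by simp [hs]; simpa using hpb)]
        simp only [List.map_cons]
        rw [ih (some e)]
        simp only [pvBgo, hs, if_pos, ite_true]
        rw [if_pos hpb]
        simp [hs]
      · rw [if_neg (by simp [hs]; simpa using hpb)]
        rw [ih (some e)]
        simp only [pvBgo, hs, if_pos, ite_true]
        rw [if_neg hpb]
        simp [hs]
    · rw [if_pos (by simp [hs])]
      simp only [List.map_cons]
      rw [ih (some e)]
      simp [pvBgo, hs]

-- ===== VERDICT (by name: the statement is the Claim_ definition above) =====
theorem cleanSeparators_py_spec : Claim_equal_cleanSeparators_py := by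
  intro entries _
  show cleanSeparators_py entries = cleanSeparators_py_alt entries
  unfold cleanSeparators_py cleanSeparators_py_alt
  rw [pvFold_g]
  rw [show pvPB [] = true from rfl]
  simp only [List.nil_append]
  rw [show (pvPopAux (pvG true entries).reverse).reverse = pvPopTrail (pvG true entries) from rfl]
  rw [(pvPop_g entries).1]
  rw [pvZip_prevs]
  rw [pvAlt_go entries none]
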